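-- pv_equiv track=rewrite | github.com/semify-eda/tristan | core/custom/tb_cntb.py | cntb_soft
-- ===== SOURCE A (Python) =====
-- def cntb_soft(word, index):
--     count = 0
--     bit_word = (word >> index) & 1
--
--     while (index > 0):
--         index -= 1
--         next_bit = (word >> index) & 1
--         if (next_bit != bit_word):
--             break
--         count += 1
--
--     return count
-- ===== SOURCE B (Python) =====
-- def cntb_soft(word, index):
--     bit_word = (word >> index) & 1
--     if index <= 0:
--         return 0
--     x = ~word if bit_word else word
--     lo = x & ((1 << index) - 1)
--     return index - lo.bit_length()
-- ===== Notes on version B (the rewrite author's own statement) =====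
-- stated objective: faster
-- what changed: replaces the bit-by-bit descending while-loop with an O(1) bit trick: complement the word when the reference bit is 1, mask the bits below index, and read the run length as index - lo.bit_length()
import Mathlib
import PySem

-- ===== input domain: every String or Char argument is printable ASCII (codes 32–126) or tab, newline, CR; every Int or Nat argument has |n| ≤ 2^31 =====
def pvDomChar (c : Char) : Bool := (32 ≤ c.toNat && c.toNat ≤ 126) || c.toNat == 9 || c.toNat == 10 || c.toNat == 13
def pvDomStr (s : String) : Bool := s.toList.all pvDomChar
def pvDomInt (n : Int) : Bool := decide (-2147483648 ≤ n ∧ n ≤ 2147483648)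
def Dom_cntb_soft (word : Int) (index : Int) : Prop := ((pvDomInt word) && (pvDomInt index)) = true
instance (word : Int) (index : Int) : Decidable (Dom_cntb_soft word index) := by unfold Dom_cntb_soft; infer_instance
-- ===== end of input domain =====

-- B replaces A's bit-by-bit descending loop by an O(1) bit trick: complement the word
-- when the reference bit is 1, mask the bits below `index`, and read the run length
-- off bit_length of the mask result.

-- ===== PORT A =====
-- the Python while-loop, descending from bit `index-1`; fuel = current index (a Nat,
-- Pre_ gives 0 ≤ index), accumulator = count
def cntbLoopA (word : Int) (bit_word : Int) : Nat → Int → Int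
  | 0, count => count
  | n + 1, count =>
    let next_bit := PySem.Int.band (word >>> n) 1
    if next_bit ≠ bit_word then count else cntbLoopA word bit_word n (count + 1)

def cntb_soft (word : Int) (index : Int) : Int :=
  let bit_word := PySem.Int.band (word >>> index.toNat) 1
  cntbLoopA word bit_word index.toNat 0

-- ===== PORT B =====
def cntb_soft_alt (word : Int) (index : Int) : Int :=
  let bit_word := PySem.Int.band (word >>> index.toNat) 1
  if index ≤ 0 then 0
  else
    let x := if bit_word ≠ 0 then Int.not word else word   -- `~word if bit_word else word`
    let lo := PySem.Int.band x ((1 <<< index.toNat) - 1)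
    index - PySem.Int.bitLength lo

-- ===== PRECONDITION & SPEC =====
-- Python raises ValueError on a negative shift count: `word >> index` with index < 0.
def Pre_cntb_soft (word : Int) (index : Int) : Prop := 0 ≤ index
instance (word : Int) (index : Int) : Decidable (Pre_cntb_soft word index) := by
  unfold Pre_cntb_soft; infer_instance
def pvWitness_cntb_soft : Int × Int := (5, 2)

def Spec_cntb_soft (word : Int) (index : Int) (out : Int) : Prop := out = cntb_soft_alt word index
instance (word : Int) (index : Int) (out : Int) : Decidable (Spec_cntb_soft word index out) := by
  unfold Spec_cntb_soft; infer_instance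

-- ===== CLAIM (what is proved, stated in full; the proofs are below) =====
def Claim_equal_cntb_soft : Prop := ∀ (word : Int) (index : Int), Dom_cntb_soft word index → Pre_cntb_soft word index → Spec_cntb_soft word index (cntb_soft word index)

-- ===== LEMMAS AND PROOFS =====

theorem pv_not_eq (n : Int) : Int.not n = -n - 1 := by
  cases n <;> simp [Int.not, Int.negSucc_eq] <;> omega

-- ediv/emod characterisation, positive divisor
theorem pv_divmod_char {b q r a : Int} (hb : 0 < b) (h : a = b * q + r)
    (h0 : 0 ≤ r) (h1 : r < b) : a / b = q ∧ a % b = r := by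
  subst h
  constructor
  · rw [show b * q + r = r + b * q by ring, Int.add_mul_ediv_left r q hb.ne',
      Int.ediv_eq_zero_of_lt h0 h1, zero_add]
  · rw [show b * q + r = r + b * q by ring, Int.add_mul_emod_self_left,
      Int.emod_eq_of_lt h0 h1]

-- the Python mask: x & (2^n - 1) = x mod 2^n, for EVERY x (also negative)
theorem pv_band_mask (x : Int) (n : Nat) :
    PySem.Int.band x ((1 <<< n) - 1) = x % 2 ^ n := by
  have hsh : (1 <<< n : Int) = 2 ^ n := by simp [Int.shiftLeft_eq]
  have hp : (0 : Int) < 2 ^ n := by positivity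
  rw [hsh]
  by_cases hx : 0 ≤ x
  · rw [PySem.Int.band_of_nonneg hx (by omega)]
    have ht : ((2 : Int) ^ n - 1).toNat = 2 ^ n - 1 := by
      have : ((2 : Int) ^ n) = ((2 ^ n : Nat) : Int) := by push_cast; ring
      omega
    rw [ht, Nat.and_two_pow_sub_one_eq_mod]
    have hxe : x = (x.toNat : Int) := by omega
    rw [hxe]
    push_cast
    simp
  · -- x < 0 : band takes the mixed branch
    unfold PySem.Int.band
    rw [if_neg hx, if_pos (show (0:Int) ≤ 2 ^ n - 1 by omega)]
    set y : Nat := (-x - 1).toNat with hy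
    have hxy : x = -(y : Int) - 1 := by omega
    have ht : ((2 : Int) ^ n - 1).toNat = 2 ^ n - 1 := by
      have : ((2 : Int) ^ n) = ((2 ^ n : Nat) : Int) := by push_cast; ring
      omega
    rw [ht, Nat.and_comm, Nat.and_two_pow_sub_one_eq_mod]
    have hylt : y % 2 ^ n < 2 ^ n := Nat.mod_lt _ (by positivity)
    have hdm : (y : Int) = 2 ^ n * (y / 2 ^ n : Nat) + (y % 2 ^ n : Nat) := by
      exact_mod_cast (Nat.div_add_mod y (2 ^ n)).symm
    have hxeq : x = 2 ^ n * (-((y / 2 ^ n : Nat) : Int) - 1) + (2 ^ n - 1 - ((y % 2 ^ n : Nat) : Int)) := by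
      rw [hxy, hdm]; push_cast; ring
    have := (pv_divmod_char hp hxeq (by omega) (by omega)).2
    rw [this]
    omega

-- peel the top bit off an emod by 2^(n+1)
theorem pv_emod_two_pow_succ (z : Int) (n : Nat) :
    z % 2 ^ (n + 1) = z % 2 ^ n + 2 ^ n * ((z / 2 ^ n) % 2) := by
  have hp : (0 : Int) < 2 ^ n := by positivity
  have hq := Int.ediv_add_emod z (2 ^ n)
  have hq2 := Int.ediv_add_emod (z / 2 ^ n) 2
  have hr0 : 0 ≤ z % 2 ^ n := Int.emod_nonneg z hp.ne'
  have hr1 : z % 2 ^ n < 2 ^ n := Int.emod_lt_of_pos z hp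
  have hb0 : 0 ≤ (z / 2 ^ n) % 2 := Int.emod_nonneg _ (by norm_num)
  have hb1 : (z / 2 ^ n) % 2 < 2 := Int.emod_lt_of_pos _ (by norm_num)
  have hz : z = 2 ^ (n + 1) * (z / 2 ^ n / 2) + (z % 2 ^ n + 2 ^ n * ((z / 2 ^ n) % 2)) := by
    rw [pow_succ]; nlinarith [hq, hq2]
  exact (pv_divmod_char (by positivity) hz (by nlinarith) (by rw [pow_succ]; nlinarith)).2

-- floor-dividing the complement
theorem pv_not_div (word : Int) (n : Nat) :
    (-word - 1) / 2 ^ n = -(word / 2 ^ n) - 1 := by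
  have hp : (0 : Int) < 2 ^ n := by positivity
  have hq := Int.ediv_add_emod word (2 ^ n)
  have hr0 : 0 ≤ word % 2 ^ n := Int.emod_nonneg word hp.ne'
  have hr1 : word % 2 ^ n < 2 ^ n := Int.emod_lt_of_pos word hp
  have h : -word - 1 = 2 ^ n * (-(word / 2 ^ n) - 1) + (2 ^ n - 1 - word % 2 ^ n) := by
    nlinarith [hq]
  exact (pv_divmod_char hp h (by omega) (by omega)).1

-- bitLength of a nonnegative Int strictly below 2^n is at most n
theorem pv_bl_le {m : Int} {n : Nat} (h0 : 0 ≤ m) (h1 : m < 2 ^ n) :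
    PySem.Int.bitLength m ≤ n := by
  by_cases hz : m = 0
  · simp [hz, PySem.Int.bitLength_zero]
  · have h2 := PySem.Int.two_pow_bitLength_le m hz
    have hna : (m.natAbs : Int) = m := by omega
    have hlt : m.natAbs < 2 ^ n := by
      have : ((2 ^ n : Nat) : Int) = 2 ^ n := by push_cast; ring
      omega
    have := lt_of_le_of_lt h2 hlt
    have := (Nat.pow_lt_pow_iff_right (by norm_num : 1 < 2)).1 this
    omega

-- bitLength of an Int in [2^n, 2^(n+1)) is exactly n+1
theorem pv_bl_eq {m : Int} {n : Nat} (h0 : (2 : Int) ^ n ≤ m) (h1 : m < 2 ^ (n + 1)) :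
    PySem.Int.bitLength m = n + 1 := by
  have hm0 : 0 ≤ m := le_trans (by positivity) h0
  have hle : PySem.Int.bitLength m ≤ n + 1 := pv_bl_le hm0 h1
  have hp0 : (0:Int) < 2 ^ n := by positivity
  have hz : m ≠ 0 := by omega
  have h2 := PySem.Int.lt_two_pow_bitLength m
  have hna : (m.natAbs : Int) = m := by omega
  have hge : 2 ^ n ≤ m.natAbs := by
    have : ((2 ^ n : Nat) : Int) = 2 ^ n := by push_cast; ring
    omega
  have := lt_of_le_of_lt hge h2
  have := (Nat.pow_lt_pow_iff_right (by norm_num : 1 < 2)).1 this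
  omega

-- the loop invariant: A's descending scan equals n minus the bit length of the
-- masked (possibly complemented) word
theorem pv_loop (word bw : Int) (hbw : bw = 0 ∨ bw = 1) : ∀ (n : Nat) (count : Int),
    cntbLoopA word bw n count =
      count + n - PySem.Int.bitLength ((if bw ≠ 0 then Int.not word else word) % 2 ^ n) := by
  intro n
  induction n with
  | zero => intro count; simp [cntbLoopA, PySem.Int.bitLength_zero]
  | succ n ih =>
    intro count
    set x : Int := if bw ≠ 0 then Int.not word else word with hx
    have hpn : (0 : Int) < 2 ^ n := by positivity
    have hr0 : 0 ≤ x % 2 ^ n := Int.emod_nonneg x hpn.ne'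
    have hr1 : x % 2 ^ n < 2 ^ n := Int.emod_lt_of_pos x hpn
    have hnext : PySem.Int.band (word >>> n) 1 = (word / 2 ^ n) % 2 := by
      rw [PySem.Int.band_one, PySem.Int.mod_eq_emod_of_pos (by norm_num),
        Int.shiftRight_eq_div_pow]
      norm_num
    have hw0 : 0 ≤ (word / 2 ^ n) % 2 := Int.emod_nonneg _ (by norm_num)
    have hw1 : (word / 2 ^ n) % 2 < 2 := Int.emod_lt_of_pos _ (by norm_num)
    -- x's bit n is 0 exactly when word's bit n equals bw
    have hbit : (x / 2 ^ n) % 2 = if (word / 2 ^ n) % 2 = bw then 0 else 1 := by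
      rcases hbw with h | h
      · subst h
        rw [hx, if_neg (by norm_num : ¬((0:Int) ≠ 0))]
        split_ifs with hcase <;> omega
      · subst h
        simp only [hx, if_pos (by norm_num : (1:Int) ≠ 0), pv_not_eq, pv_not_div word n]
        split_ifs with hcase <;> omega
    rw [cntbLoopA]
    simp only [hnext]
    split_ifs with hbr
    · -- break: the top bit differs, bitLength of the mask is n+1
      have hx1 : (x / 2 ^ n) % 2 = 1 := by rw [hbit, if_neg hbr]
      have hm : x % 2 ^ (n + 1) = x % 2 ^ n + 2 ^ n := by
        rw [pv_emod_two_pow_succ, hx1]; ring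
      have hbl : PySem.Int.bitLength (x % 2 ^ n + 2 ^ n) = n + 1 :=
        pv_bl_eq (by omega) (by rw [pow_succ]; omega)
      rw [hm, hbl]
      push_cast; ring
    · -- continue: the top bit agrees, the mask is unchanged
      have hx0 : (x / 2 ^ n) % 2 = 0 := by rw [hbit, if_pos (not_not.mp hbr)]
      have : x % 2 ^ (n + 1) = x % 2 ^ n := by
        rw [pv_emod_two_pow_succ, hx0]; ring_nf
      rw [ih, this]
      push_cast; ring

-- ===== VERDICT (by name: the statement is the Claim_ definition above) =====
theorem cntb_soft_spec : Claim_equal_cntb_soft := by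
  intro word index _ hpre
  unfold Spec_cntb_soft cntb_soft cntb_soft_alt
  set bw : Int := PySem.Int.band (word >>> index.toNat) 1 with hbwdef
  have hbw : bw = 0 ∨ bw = 1 := by
    have h0 := PySem.Int.mod_nonneg (word >>> index.toNat) (show (0:Int) < 2 by norm_num)
    have h1 := PySem.Int.mod_lt (word >>> index.toNat) (show (0:Int) < 2 by norm_num)
    rw [hbwdef, PySem.Int.band_one]
    omega
  by_cases hle : index ≤ 0
  · have : index.toNat = 0 := by omega
    rw [if_pos hle, this]
    simp [cntbLoopA]
  · rw [if_neg hle]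
    rw [pv_loop word bw hbw index.toNat 0]
    simp only [pv_band_mask]
    have h1 : (index.toNat : Int) = index := by omega
    rw [h1]
    ring
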